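-- pv_equiv track=rewrite | github.com/SuBroXz11/FOCP-Final-Programming-Tasks | Task2/Task2.py | analyze_file
-- ===== SOURCE A (Python) =====
-- def analyze_file(file_lines):
--     """
--     Analyzes a list of lines representing cat visits.
--
--     Parameters:
--     - file_lines (list): A list containing lines of a file with cat visit data.
--
--     Returns:
--     tuple: A tuple containing the following elements:
--         - cat_visits (int): The number of visits by the cat labeled as 'OURS'.
--         - other_cats (int): The number of visits by other cats labeled as 'THEIRS'.
--         - total_time_in_house (int): The total time spent by the 'OURS' cat in the house (in minutes).
--         - durations (list): A list containing the durations of each visit by the 'OURS' cat (in minutes).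
--     """
--     cat_visits = 0
--     other_cats = 0
--     total_time_in_house = 0
--     durations = []
--
--     for line in file_lines:
--         if line.strip() == 'END':
--             break
--
--         parts = line.strip().split(',')
--         cat_type, entry_time, exit_time = parts
--
--         entry_time = int(entry_time)
--         exit_time = int(exit_time)
--
--         if cat_type == 'OURS':
--             cat_visits += 1
--             total_time_in_house += exit_time - entry_time
--             durations.append(exit_time - entry_time)
--         elif cat_type == 'THEIRS':
--             other_cats += 1
--
--     return cat_visits, other_cats, total_time_in_house, durations
-- ===== SOURCE B (Python) =====
-- def _parse(line):
--     cat_type, entry_time, exit_time = line.strip().split(',')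
--     return cat_type, int(entry_time), int(exit_time)
--
--
-- def analyze_file(file_lines):
--     cut = next((i for i, l in enumerate(file_lines) if l.strip() == 'END'),
--                len(file_lines))
--     parsed = [_parse(l) for l in file_lines[:cut]]
--     durations = [e - s for c, s, e in parsed if c == 'OURS']
--     other_cats = sum(1 for c, _, _ in parsed if c == 'THEIRS')
--     return len(durations), other_cats, sum(durations), durations
-- ===== Notes on version B (the rewrite author's own statement) =====
-- stated objective: simpler
-- what changed: A's single for-loop with break and four running accumulators is replaced by: find the index of the first 'END' line, slice the list there, parse every pre-END line once into (cat, entry, exit) tuples, then compute the four results by separate comprehensions/aggregations over the parsed list.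
-- outside the precondition, e.g. on analyze_file(['garbage']): A raises ValueError, B raises ValueError; on analyze_file(['OURS,x,2']): A raises ValueError, B raises ValueError
import Mathlib
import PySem

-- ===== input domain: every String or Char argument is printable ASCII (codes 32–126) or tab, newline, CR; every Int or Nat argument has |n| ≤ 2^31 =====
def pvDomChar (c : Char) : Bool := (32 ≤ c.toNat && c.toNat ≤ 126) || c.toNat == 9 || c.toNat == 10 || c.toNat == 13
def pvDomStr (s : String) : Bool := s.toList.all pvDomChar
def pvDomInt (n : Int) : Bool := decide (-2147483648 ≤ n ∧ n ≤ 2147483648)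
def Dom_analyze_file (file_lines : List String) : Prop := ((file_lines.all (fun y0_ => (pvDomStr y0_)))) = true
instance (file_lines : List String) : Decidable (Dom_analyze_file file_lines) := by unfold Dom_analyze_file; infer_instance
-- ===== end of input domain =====

-- B replaces A's single break-loop with four accumulators by: find the index of the first
-- 'END' line, slice, parse every pre-END line once, then aggregate with separate
-- comprehensions (objective: simpler decomposition; return value only, no side effects).

-- shared primitive: line.split(',')  (sep "," ≠ "", so split? always returns some)
def pvSplitComma (s : String) : List String := (PySem.Str.split? s ",").getD []

-- ===== PORT A =====
-- the for-loop with break, carrying A's four accumulators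
def analyze_file_go : List String → Int → Int → Int → List Int → Int × Int × Int × List Int
  | [], cat_visits, other_cats, total_time, durations => (cat_visits, other_cats, total_time, durations)
  | line :: rest, cat_visits, other_cats, total_time, durations =>
    if PySem.Str.strip line == "END" then (cat_visits, other_cats, total_time, durations)
    else
      match pvSplitComma (PySem.Str.strip line) with
      | [cat_type, entry_s, exit_s] =>
        match PySem.Int.ofStr? entry_s, PySem.Int.ofStr? exit_s with
        | some entry_time, some exit_time =>
          if cat_type == "OURS" then
            analyze_file_go rest (cat_visits + 1) other_cats (total_time + (exit_time - entry_time)) (durations ++ [exit_time - entry_time])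
          else if cat_type == "THEIRS" then
            analyze_file_go rest cat_visits (other_cats + 1) total_time durations
          else
            analyze_file_go rest cat_visits other_cats total_time durations
        | _, _ => (cat_visits, other_cats, total_time, durations)   -- int() ValueError: excluded by Pre_
      | _ => (cat_visits, other_cats, total_time, durations)        -- unpacking ValueError: excluded by Pre_

def analyze_file (file_lines : List String) : Int × Int × Int × List Int :=
  analyze_file_go file_lines 0 0 0 []

-- ===== PORT B =====
-- _parse(line): unpack line.strip().split(',') and convert; the fallbacks are the
-- inputs where Python B raises (excluded by Pre_)
def pvParse (line : String) : String × Int × Int :=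
  match pvSplitComma (PySem.Str.strip line) with
  | [cat_type, entry_s, exit_s] =>
      (cat_type, (PySem.Int.ofStr? entry_s).getD 0, (PySem.Int.ofStr? exit_s).getD 0)
  | _ => ("", 0, 0)

def analyze_file_alt (file_lines : List String) : Int × Int × Int × List Int :=
  let cut := (file_lines.findIdx? (fun l => PySem.Str.strip l == "END")).getD file_lines.length
  let parsed := (file_lines.take cut).map pvParse   -- file_lines[:cut], 0 ≤ cut ≤ len: slice = take
  let durations := (parsed.filter (fun p => p.1 == "OURS")).map (fun p => p.2.2 - p.2.1)
  ((durations.length : Int),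
   (parsed.countP (fun p => p.1 == "THEIRS") : Int),
   durations.sum,
   durations)

-- ===== PRECONDITION & SPEC =====
-- Pre_ excludes exactly the inputs where A raises ValueError: a line before the first
-- 'END' whose stripped form does not split on ',' into exactly 3 parts, or whose 2nd/3rd
-- part is not a valid int literal.
def Pre_analyze_file (file_lines : List String) : Prop :=
  ((file_lines.takeWhile (fun l => !(PySem.Str.strip l == "END"))).all
    (fun l => match pvSplitComma (PySem.Str.strip l) with
      | [_, e, x] => (PySem.Int.ofStr? e).isSome && (PySem.Int.ofStr? x).isSome
      | _ => false)) = true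
instance (file_lines : List String) : Decidable (Pre_analyze_file file_lines) := by
  unfold Pre_analyze_file; infer_instance

def pvWitness_analyze_file : List String :=
  ["OURS, 1 ,5", "THEIRS,0,3", "OURS,2,2", "END", "garbage"]

def Spec_analyze_file (file_lines : List String) (out : Int × Int × Int × List Int) : Prop := out = analyze_file_alt file_lines
instance (file_lines : List String) (out : Int × Int × Int × List Int) : Decidable (Spec_analyze_file file_lines out) := by unfold Spec_analyze_file; infer_instance

-- ===== CLAIM (what is proved, stated in full; the proofs are below) =====
def Claim_equal_analyze_file : Prop := ∀ (file_lines : List String), Dom_analyze_file file_lines → Pre_analyze_file file_lines → Spec_analyze_file file_lines (analyze_file file_lines)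

-- ===== LEMMAS AND PROOFS =====

-- unfolding B on a non-'END' head line
lemma alt_cons_of_not_end {l : String} {rest : List String}
    (h : (PySem.Str.strip l == "END") = false) :
    analyze_file_alt (l :: rest) =
      ((if (pvParse l).1 == "OURS" then 1 else 0) + (analyze_file_alt rest).1,
       (if (pvParse l).1 == "THEIRS" then 1 else 0) + (analyze_file_alt rest).2.1,
       (if (pvParse l).1 == "OURS" then (pvParse l).2.2 - (pvParse l).2.1 else 0) + (analyze_file_alt rest).2.2.1,
       (if (pvParse l).1 == "OURS" then [(pvParse l).2.2 - (pvParse l).2.1] else []) ++ (analyze_file_alt rest).2.2.2) := by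
  unfold analyze_file_alt
  cases hf : rest.findIdx? (fun l => PySem.Str.strip l == "END") with
  | none =>
    by_cases ho : (pvParse l).1 == "OURS" <;>
      by_cases ht : (pvParse l).1 == "THEIRS" <;>
        simp [List.findIdx?_cons, h, hf, ho, ht] <;> omega
  | some i =>
    by_cases ho : (pvParse l).1 == "OURS" <;>
      by_cases ht : (pvParse l).1 == "THEIRS" <;>
        simp [List.findIdx?_cons, h, hf, ho, ht] <;> omega

lemma alt_cons_of_end {l : String} {rest : List String}
    (h : (PySem.Str.strip l == "END") = true) :
    analyze_file_alt (l :: rest) = (0, 0, 0, []) := by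
  unfold analyze_file_alt
  simp [List.findIdx?_cons, h]

-- loop invariant: A's loop adds B's totals onto the incoming accumulators
lemma go_eq_alt (ls : List String) : ∀ cv oc tt ds, Pre_analyze_file ls →
    analyze_file_go ls cv oc tt ds =
      (cv + (analyze_file_alt ls).1, oc + (analyze_file_alt ls).2.1,
       tt + (analyze_file_alt ls).2.2.1, ds ++ (analyze_file_alt ls).2.2.2) := by
  induction ls with
  | nil => intro cv oc tt ds _; simp [analyze_file_go, analyze_file_alt]
  | cons l rest ih =>
    intro cv oc tt ds hpre
    by_cases hEnd : (PySem.Str.strip l == "END") = true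
    · simp [analyze_file_go, hEnd, alt_cons_of_end hEnd]
    · have hEnd' : (PySem.Str.strip l == "END") = false := eq_false_of_ne_true hEnd
      unfold Pre_analyze_file at hpre
      rw [List.takeWhile_cons, hEnd'] at hpre
      simp only [Bool.not_false, if_true, List.all_cons, Bool.and_eq_true] at hpre
      obtain ⟨hl, hrest⟩ := hpre
      have hrest' : Pre_analyze_file rest := hrest
      rw [alt_cons_of_not_end hEnd']
      -- the head line parses: exactly 3 parts, both ints valid
      revert hl
      cases hsp : pvSplitComma (PySem.Str.strip l) with
      | nil => simp
      | cons p1 t1 =>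
        cases t1 with
        | nil => simp
        | cons p2 t2 =>
          cases t2 with
          | nil => simp
          | cons p3 t3 =>
            cases t3 with
            | cons p4 t4 => simp
            | nil =>
              simp only [Bool.and_eq_true, Option.isSome_iff_exists]
              rintro ⟨⟨ev, hev⟩, ⟨xv, hxv⟩⟩
              have hp : pvParse l = (p1, ev, xv) := by
                simp only [pvParse, hsp, hev, hxv, Option.getD_some]
              rw [hp]
              simp only [analyze_file_go, hEnd', hsp, hev, hxv, Bool.false_eq_true, if_false]
              by_cases ho : (p1 == "OURS") = true
              · have hp1 : p1 = "OURS" := by simpa using ho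
                subst hp1
                have hnt : ("OURS" == "THEIRS") = false := by decide
                simp only [ho, if_true, hnt, Bool.false_eq_true, if_false]
                rw [ih _ _ _ _ hrest']
                simp only [Prod.mk.injEq, List.append_assoc]
                refine ⟨by omega, by omega, by omega, by simp⟩
              · have ho' : (p1 == "OURS") = false := eq_false_of_ne_true ho
                simp only [ho', Bool.false_eq_true, if_false]
                by_cases ht : (p1 == "THEIRS") = true
                · simp only [ht, if_true]
                  rw [ih _ _ _ _ hrest']
                  simp only [Prod.mk.injEq]
                  refine ⟨by omega, by omega, by omega, by simp⟩
                · have ht' : (p1 == "THEIRS") = false := eq_false_of_ne_true ht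
                  simp only [ht', Bool.false_eq_true, if_false]
                  rw [ih _ _ _ _ hrest']
                  simp only [Prod.mk.injEq]
                  refine ⟨by omega, by omega, by omega, by simp⟩

-- ===== VERDICT (by name: the statement is the Claim_ definition above) =====
theorem analyze_file_spec : Claim_equal_analyze_file := by
  intro file_lines _hdom hpre
  unfold Spec_analyze_file analyze_file
  rw [go_eq_alt file_lines 0 0 0 [] hpre]
  simp only [zero_add, List.nil_append]
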